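-- pv_equiv track=rewrite | github.com/smashedr/carl-cogs | utils/utils.py | _count_months
-- ===== SOURCE A (Python) =====
-- import itertools
--
-- def _count_months(days):
--     lens = [31, 28, 31, 30, 31, 30, 31, 31, 30, 31, 30, 31]
--     cy = itertools.cycle(lens)
--     months = 0
--     m_temp = 0
--     mo_len = next(cy)
--     for i in range(1, days + 1):
--         m_temp += 1
--         if m_temp == mo_len:
--             months += 1
--             m_temp = 0
--             mo_len = next(cy)
--             if mo_len == 28 and months >= 48:
--                 mo_len += 1
--
--     weeks, days = divmod(m_temp, 7)
--     return months, weeks, days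
-- ===== SOURCE B (Python) =====
-- # O(1) arithmetic re-implementation: after the first 48 months (1460 days) every
-- # cycle of 12 months in A spans 366 days (A gives *every* February 29 days once
-- # months >= 48), so the answer is computed from div/mod plus a 12-entry table.
--
-- _CUM_NORMAL = [0, 31, 59, 90, 120, 151, 181, 212, 243, 273, 304, 334, 365]
-- _CUM_LEAP = [0, 31, 60, 91, 121, 152, 182, 213, 244, 274, 305, 335, 366]
--
--
-- def _count_months(days):
--     d = max(days, 0)
--     if d >= 1460:
--         q, r = divmod(d - 1460, 366)
--         cum = _CUM_LEAP
--         base = 48 + 12 * q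
--     else:
--         q, r = divmod(d, 365)
--         cum = _CUM_NORMAL
--         base = 12 * q
--     m = sum(1 for p in cum[1:] if p <= r)
--     months = base + m
--     m_temp = r - cum[m]
--     weeks, rest = divmod(m_temp, 7)
--     return months, weeks, rest
-- ===== Notes on version B (the rewrite author's own statement) =====
-- stated objective: faster
-- what changed: A counts months by simulating every single day; B computes the same triple in O(1) arithmetic, exploiting that A's first 48 months form four 365-day years and every later 12-month cycle spans 366 days (A gives every February after month 48 a 29th day), using div/mod plus a 13-entry cumulative month table.
import Mathlib
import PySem

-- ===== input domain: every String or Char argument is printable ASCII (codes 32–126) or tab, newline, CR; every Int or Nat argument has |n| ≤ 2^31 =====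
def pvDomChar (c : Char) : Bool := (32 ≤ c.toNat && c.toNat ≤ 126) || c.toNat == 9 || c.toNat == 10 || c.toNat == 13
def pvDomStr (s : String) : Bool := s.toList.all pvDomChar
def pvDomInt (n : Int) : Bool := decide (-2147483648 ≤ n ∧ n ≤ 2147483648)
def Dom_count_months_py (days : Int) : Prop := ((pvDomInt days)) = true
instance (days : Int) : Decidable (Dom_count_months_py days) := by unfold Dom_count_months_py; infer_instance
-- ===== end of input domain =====

-- B replaces A's day-by-day loop by O(1) arithmetic over A's periodic month
-- structure (365-day years for the first 48 months, 366-day cycles afterwards).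

-- ===== PORT A =====
def lensA : List Int := [31, 28, 31, 30, 31, 30, 31, 31, 30, 31, 30, 31]

-- one iteration of A's for-loop body; itertools.cycle is modelled by the index
-- of the next element, advanced modulo 12 (exact: cycle repeats `lens` forever)
def stepA (s : Int × Int × Int × Nat) : Int × Int × Int × Nat :=
  let months := s.1
  let m_temp := s.2.1 + 1
  let mo_len := s.2.2.1
  let idx := s.2.2.2
  if m_temp == mo_len then
    let months := months + 1
    let mo_len' := lensA.getD idx 0
    let idx' := (idx + 1) % 12
    let mo_len'' := if mo_len' == 28 && 48 ≤ months then mo_len' + 1 else mo_len'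
    (months, 0, mo_len'', idx')
  else (months, m_temp, mo_len, idx)

def count_months_py (days : Int) : List Int :=
  let s := (PySem.List.pyRange 1 (days + 1) 1).foldl (fun s _ => stepA s) (0, 0, 31, 1)
  -- divmod(m_temp, 7): the divisor is the nonzero literal 7, so divmod? cannot fail
  [s.1, PySem.Int.floordiv s.2.1 7, PySem.Int.mod s.2.1 7]

-- ===== PORT B =====
def cumNormalB : List Int := [0, 31, 59, 90, 120, 151, 181, 212, 243, 273, 304, 334, 365]
def cumLeapB : List Int := [0, 31, 60, 91, 121, 152, 182, 213, 244, 274, 305, 335, 366]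

def count_months_py_alt (days : Int) : List Int :=
  let d := max days 0
  let qrcb : Int × Int × List Int × Int :=
    if 1460 ≤ d then
      (PySem.Int.floordiv (d - 1460) 366, PySem.Int.mod (d - 1460) 366, cumLeapB,
        48 + 12 * PySem.Int.floordiv (d - 1460) 366)
    else
      (PySem.Int.floordiv d 365, PySem.Int.mod d 365, cumNormalB,
        12 * PySem.Int.floordiv d 365)
  let r := qrcb.2.1
  let cum := qrcb.2.2.1
  let base := qrcb.2.2.2
  let m := ((cum.drop 1).filter (fun p => decide (p ≤ r))).length
  let months := base + (m : Int)
  let m_temp := r - cum.getD m 0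
  [months, PySem.Int.floordiv m_temp 7, PySem.Int.mod m_temp 7]

-- ===== PRECONDITION & SPEC =====
def Spec_count_months_py (days : Int) (out : List Int) : Prop := out = count_months_py_alt days
instance (days : Int) (out : List Int) : Decidable (Spec_count_months_py days out) := by unfold Spec_count_months_py; infer_instance

-- ===== CLAIM (what is proved, stated in full; the proofs are below) =====
def Claim_equal_count_months_py : Prop := ∀ (days : Int), Dom_count_months_py days → Spec_count_months_py days (count_months_py days)

-- ===== LEMMAS AND PROOFS =====

-- number of whole months inside the first r days of a (normal / all-leap) year
def muN (r : Nat) : Nat := ((cumNormalB.drop 1).filter (fun p => decide (p ≤ (r : Int)))).length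
def muL (r : Nat) : Nat := ((cumLeapB.drop 1).filter (fun p => decide (p ≤ (r : Int)))).length

def lensLeap : List Int := [31, 29, 31, 30, 31, 30, 31, 31, 30, 31, 30, 31]

-- closed form of A's loop state after n days, n ≤ 1460 (phase 1: normal years)
def Phi (n : Nat) : Int × Int × Int × Nat :=
  (12 * ((n / 365 : Nat) : Int) + (muN (n % 365) : Int),
   ((n % 365 : Nat) : Int) - cumNormalB.getD (muN (n % 365)) 0,
   lensA.getD (muN (n % 365)) 0, (muN (n % 365) + 1) % 12)

-- closed form of A's loop state 1460 + k days in (phase 2: every Feb has 29 days)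
def rhoL (r : Nat) : Int × Int × Nat :=
  (((r : Nat) : Int) - cumLeapB.getD (muL r) 0, lensLeap.getD (muL r) 0, (muL r + 1) % 12)

def Psi (k : Nat) : Int × Int × Int × Nat :=
  (48 + 12 * ((k / 366 : Nat) : Int) + (muL (k % 366) : Int), rhoL (k % 366))

set_option maxRecDepth 100000 in
theorem stepA_phi (n : Nat) (h : n < 1460) : stepA (Phi n) = Phi (n + 1) := by
  revert h; revert n; decide

set_option maxRecDepth 100000 in
theorem stepA_psi_base (r : Nat) (h : r < 366) : stepA (Psi r) = Psi (r + 1) := by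
  revert h; revert r; decide

-- above 48 months the `months` counter shifts through stepA additively
theorem stepA_shift (j m : Int) (s : Int × Int × Nat) (hm : 48 ≤ m) (hj : 0 ≤ j) :
    stepA (m + j, s) = ((stepA (m, s)).1 + j, (stepA (m, s)).2) := by
  obtain ⟨t, l, i⟩ := s
  have h48 : decide (48 ≤ m + 1) = true := by simp; omega
  have h48' : decide (48 ≤ m + j + 1) = true := by simp; omega
  simp only [stepA, h48, h48', Bool.and_true]
  split_ifs <;> simp_all [Prod.mk.injEq] <;> try omega

theorem psi_mod_div (k : Nat) :
    Psi k = ((Psi (k % 366)).1 + 12 * ((k / 366 : Nat) : Int), (Psi (k % 366)).2) := by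
  have h1 : k % 366 % 366 = k % 366 := by omega
  have h2 : k % 366 / 366 = 0 := by omega
  simp only [Psi, h1, h2, Prod.mk.injEq]
  refine ⟨by push_cast; ring, trivial⟩

theorem psi_fst_ge (k : Nat) : 48 ≤ (Psi k).1 := by
  simp only [Psi]
  have := Int.natCast_nonneg (k / 366)
  have := Int.natCast_nonneg (muL (k % 366))
  omega

theorem stepA_psi (k : Nat) : stepA (Psi k) = Psi (k + 1) := by
  have hr : k % 366 < 366 := Nat.mod_lt _ (by omega)
  have hj : (0 : Int) ≤ 12 * ((k / 366 : Nat) : Int) := by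
    have := Int.natCast_nonneg (k / 366); omega
  calc stepA (Psi k)
      = stepA ((Psi (k % 366)).1 + 12 * ((k / 366 : Nat) : Int), (Psi (k % 366)).2) := by
        rw [← psi_mod_div]
    _ = ((stepA (Psi (k % 366))).1 + 12 * ((k / 366 : Nat) : Int),
          (stepA (Psi (k % 366))).2) := by
        rw [stepA_shift _ _ _ (psi_fst_ge _) hj]
    _ = ((Psi (k % 366 + 1)).1 + 12 * ((k / 366 : Nat) : Int), (Psi (k % 366 + 1)).2) := by
        rw [stepA_psi_base _ hr]
    _ = Psi (k + 1) := by
        have hm : (k + 1) % 366 = (k % 366 + 1) % 366 := by omega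
        have hd : (k + 1) / 366 = k / 366 + (k % 366 + 1) / 366 := by omega
        rw [psi_mod_div (k + 1), psi_mod_div (k % 366 + 1), hm, hd]
        simp only [Prod.mk.injEq]
        refine ⟨by push_cast; ring, trivial⟩

theorem foldl_const_step {α β : Type} (f : α → α) (l : List β) (s : α) :
    l.foldl (fun s _ => f s) s = f^[l.length] s := by
  induction l generalizing s with
  | nil => rfl
  | cons x xs ih => simp [List.foldl_cons, ih, Function.iterate_succ_apply]

theorem iter_phi (n : Nat) (h : n ≤ 1460) : stepA^[n] (0, 0, 31, 1) = Phi n := by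
  induction n with
  | zero => rfl
  | succ n ih =>
    rw [Function.iterate_succ_apply', ih (by omega), stepA_phi n (by omega)]

theorem iter_psi (k : Nat) : stepA^[k] (Psi 0) = Psi k := by
  induction k with
  | zero => rfl
  | succ k ih => rw [Function.iterate_succ_apply', ih, stepA_psi]

theorem phi_psi : Phi 1460 = Psi 0 := by decide

theorem iter_state (n : Nat) :
    stepA^[n] (0, 0, 31, 1) = if n < 1460 then Phi n else Psi (n - 1460) := by
  by_cases h : n < 1460
  · rw [if_pos h, iter_phi n (by omega)]
  · rw [if_neg h]
    have hk : n - 1460 + 1460 = n := by omega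
    calc stepA^[n] (0, 0, 31, 1)
        = stepA^[n - 1460 + 1460] (0, 0, 31, 1) := by rw [hk]
      _ = stepA^[n - 1460] (stepA^[1460] (0, 0, 31, 1)) := Function.iterate_add_apply ..
      _ = Psi (n - 1460) := by rw [iter_phi 1460 le_rfl, phi_psi, iter_psi]

theorem max_toNat (d : Int) : max d 0 = ((d.toNat : Nat) : Int) := by
  rw [Int.toNat_eq_max]

theorem count_months_py_states (days : Int) :
    count_months_py days =
      (fun s : Int × Int × Int × Nat => [s.1, PySem.Int.floordiv s.2.1 7, PySem.Int.mod s.2.1 7])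
        (if days.toNat < 1460 then Phi days.toNat else Psi (days.toNat - 1460)) := by
  rw [count_months_py, foldl_const_step, PySem.List.length_pyRange_one]
  have h : (days + 1 - 1).toNat = days.toNat := by omega
  rw [h, iter_state]

-- ===== VERDICT (by name: the statement is the Claim_ definition above) =====
theorem count_months_py_spec : Claim_equal_count_months_py := by
  intro days _
  show count_months_py days = count_months_py_alt days
  rw [count_months_py_states, count_months_py_alt, max_toNat]
  by_cases h : (1460 : Int) ≤ (days.toNat : Int)
  · have h' : 1460 ≤ days.toNat := by exact_mod_cast h
    rw [if_neg (by omega), if_pos h]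
    have hsub : ((days.toNat : Nat) : Int) - 1460 = ((days.toNat - 1460 : Nat) : Int) := by omega
    have hq : PySem.Int.floordiv ((days.toNat - 1460 : Nat) : Int) 366
        = (((days.toNat - 1460) / 366 : Nat) : Int) := by
      exact_mod_cast PySem.Int.floordiv_natCast (days.toNat - 1460) 366
    have hr : PySem.Int.mod ((days.toNat - 1460 : Nat) : Int) 366
        = (((days.toNat - 1460) % 366 : Nat) : Int) := by
      exact_mod_cast PySem.Int.mod_natCast (days.toNat - 1460) 366
    rw [hsub, hq, hr]
    simp only [Psi, rhoL, muL]
  · have h' : days.toNat < 1460 := by omega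
    rw [if_pos h', if_neg h]
    have hq : PySem.Int.floordiv ((days.toNat : Nat) : Int) 365
        = ((days.toNat / 365 : Nat) : Int) := by
      exact_mod_cast PySem.Int.floordiv_natCast days.toNat 365
    have hr : PySem.Int.mod ((days.toNat : Nat) : Int) 365
        = ((days.toNat % 365 : Nat) : Int) := by
      exact_mod_cast PySem.Int.mod_natCast days.toNat 365
    rw [hq, hr]
    simp only [Phi, muN]
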